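-- pv_equiv track=rewrite | github.com/Wulfic/Cicada3301 | Tools/p20_complete_stream.py | read_2x83
-- ===== SOURCE A (Python) =====
-- def read_2x83(text):
--     rows, cols = 83, 2
--     result = ""
--     for c in range(cols):
--         for r in range(rows):
--             idx = r * cols + c
--             if idx < len(text):
--                 result += text[idx]
--     return result
-- ===== SOURCE B (Python) =====
-- def read_2x83(text):
--     # Column-major read of the 2x83 grid = even-indexed chars then odd-indexed
--     # chars, both capped at index 166.
--     return text[0:166:2] + text[1:166:2]
-- ===== Notes on version B (the rewrite author's own statement) =====
-- stated objective: simpler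
-- what changed: Replaced the nested column/row loop with character accumulation by two capped strided slices text[0:166:2] + text[1:166:2] returned as a single expression.
import Mathlib
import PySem

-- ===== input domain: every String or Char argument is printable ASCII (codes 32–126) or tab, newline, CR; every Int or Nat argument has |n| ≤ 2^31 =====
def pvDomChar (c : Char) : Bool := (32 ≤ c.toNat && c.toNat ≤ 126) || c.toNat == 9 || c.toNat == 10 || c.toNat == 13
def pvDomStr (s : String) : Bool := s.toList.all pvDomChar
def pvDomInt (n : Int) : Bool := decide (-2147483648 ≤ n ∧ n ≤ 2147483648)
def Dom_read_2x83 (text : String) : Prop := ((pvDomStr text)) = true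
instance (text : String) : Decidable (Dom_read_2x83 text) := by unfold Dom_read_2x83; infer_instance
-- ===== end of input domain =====

-- B replaces A's nested column/row accumulation loop with two capped strided slices; objective: simpler.

-- ===== PORT A =====
def read_2x83 (text : String) : String :=
  (PySem.List.pyRange 0 2 1).foldl (fun result c =>
    (PySem.List.pyRange 0 83 1).foldl (fun result r =>
      let idx := r * 2 + c
      if idx < PySem.Str.len text then
        match PySem.Str.pyGet? text idx with
        | some ch => result.push ch
        | none => result
      else result) result) ""

-- ===== PORT B =====
def read_2x83_alt (text : String) : String :=
  ((PySem.Str.slice? text (some 0) (some 166) 2).getD "")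
    ++ ((PySem.Str.slice? text (some 1) (some 166) 2).getD "")

-- ===== PRECONDITION & SPEC =====
def Spec_read_2x83 (text : String) (out : String) : Prop := out = read_2x83_alt text
instance (text : String) (out : String) : Decidable (Spec_read_2x83 text out) := by unfold Spec_read_2x83; infer_instance

-- ===== CLAIM (what is proved, stated in full; the proofs are below) =====
def Claim_equal_read_2x83 : Prop := ∀ (text : String), Dom_read_2x83 text → Spec_read_2x83 text (read_2x83 text)

-- ===== LEMMAS AND PROOFS =====

-- the characters of column c (c = 0 or 1) of the 2x83 column-major grid
def pvCol (l : List Char) (c : Nat) : List Char :=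
  (List.range 83).filterMap (fun k => l[2 * k + c]?)

theorem pvFilterMap_range_extend {α : Type} (g : Nat → Option α) (a b : Nat)
    (hab : a ≤ b) (h : ∀ k, a ≤ k → k < b → g k = none) :
    (List.range b).filterMap g = (List.range a).filterMap g := by
  rw [show b = a + (b - a) by omega, List.range_add, List.filterMap_append]
  have hnil : ((List.range (b - a)).map (a + ·)).filterMap g = [] := by
    rw [List.filterMap_eq_nil_iff]
    intro x hx
    obtain ⟨k, hk, rfl⟩ := List.mem_map.mp hx
    exact h _ (by omega) (by rw [List.mem_range] at hk; omega)
  simp [hnil]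

theorem pvInner (text : String) (c : Nat) (m : Nat) (res : String) :
    ((List.range m).map (fun k : Nat => ((0:Int) + k))).foldl
      (fun result r =>
        let idx := r * 2 + (c : Int)
        if idx < PySem.Str.len text then
          match PySem.Str.pyGet? text idx with
          | some ch => result.push ch
          | none => result
        else result) res
    = res ++ String.ofList ((List.range m).filterMap (fun k => text.toList[2 * k + c]?)) := by
  induction m with
  | zero => simp
  | succ m ih =>
    rw [List.range_succ, List.map_append, List.foldl_append, ih, List.filterMap_append]
    simp only [List.map_cons, List.map_nil, List.foldl_cons, List.foldl_nil,
      List.filterMap_cons, List.filterMap_nil]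
    have hidx : ((0:Int) + (m:Int)) * 2 + (c:Int) = ((2 * m + c : Nat) : Int) := by push_cast; ring
    rw [hidx]
    have hlen : PySem.Str.len text = (text.toList.length : Int) := by
      simp [PySem.Str.len]
    by_cases h : 2 * m + c < text.toList.length
    · have hcond : ((2 * m + c : Nat) : Int) < PySem.Str.len text := by rw [hlen]; exact_mod_cast h
      rw [if_pos hcond, PySem.Str.pyGet?_natCast]
      rw [List.getElem?_eq_getElem h]
      apply String.ext
      simp
    · have hcond : ¬ ((2 * m + c : Nat) : Int) < PySem.Str.len text := by rw [hlen]; exact_mod_cast h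
      rw [if_neg hcond]
      rw [List.getElem?_eq_none (by omega)]
      simp

theorem pvA_eq (text : String) :
    read_2x83 text = String.ofList (pvCol text.toList 0) ++ String.ofList (pvCol text.toList 1) := by
  unfold read_2x83
  have h2 : PySem.List.pyRange 0 2 1 = [0, 1] := by decide
  have h83 : PySem.List.pyRange 0 83 1 = (List.range 83).map (fun k : Nat => ((0:Int) + k)) := by
    rw [PySem.List.pyRange_one]; rfl
  rw [h2, h83]
  simp only [List.foldl_cons, List.foldl_nil]
  have e0 := pvInner text 0 83 ""
  simp only [Nat.cast_zero] at e0
  rw [e0]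
  have e1 := pvInner text 1 83
    ("" ++ String.ofList ((List.range 83).filterMap (fun k => text.toList[2 * k + 0]?)))
  simp only [Nat.cast_one] at e1
  rw [e1]
  simp [pvCol]

theorem pvSlice_eq (l : List Char) (c : Nat) (hc : c ≤ 1) :
    PySem.List.slice? l (some (c : Int)) (some 166) 2 = some (pvCol l c) := by
  unfold PySem.List.slice? PySem.List.sliceIndices
  norm_num
  have h0 : ¬((c : Int) < 0) := by omega
  simp only [if_neg h0]
  by_cases hcn : c ≤ l.length
  · have hs : min (c : Int) (l.length : Int) = (c : Int) := by omega
    rw [hs]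
    have hfun : (fun x : Nat => l[((c : Int) + 2 * (x : Int)).toNat]?)
        = fun x : Nat => l[2 * x + c]? := by
      funext x
      congr 1
      omega
    rw [hfun]
    unfold pvCol
    split_ifs with h
    · refine (pvFilterMap_range_extend _ _ 83 (by omega) ?_).symm
      intro k hk hk83
      rw [List.getElem?_eq_none]
      omega
    · refine (pvFilterMap_range_extend _ 0 83 (by omega) ?_).symm
      intro k hk hk83
      rw [List.getElem?_eq_none]
      omega
  · have hln : l = [] := List.length_eq_zero_iff.mp (by omega)
    subst hln
    simp [pvCol]

theorem pvB_eq (text : String) :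
    read_2x83_alt text = String.ofList (pvCol text.toList 0) ++ String.ofList (pvCol text.toList 1) := by
  unfold read_2x83_alt
  have s0 := pvSlice_eq text.toList 0 (by norm_num)
  have s1 := pvSlice_eq text.toList 1 (by norm_num)
  norm_num at s0 s1
  simp [PySem.Str.slice?, s0, s1]

-- ===== VERDICT (by name: the statement is the Claim_ definition above) =====
theorem read_2x83_spec : Claim_equal_read_2x83 := by
  intro text _
  unfold Spec_read_2x83
  rw [pvA_eq, pvB_eq]
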